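-- pv_equiv track=rewrite | github.com/HugoM25/AutoThreadHorror | AutoThreadHorror/AutoThreadPy.py | TriageEZ
-- ===== SOURCE A (Python) =====
-- def TriageEZ(listefilesmp3) :
--     newlistesorted = []
--     for i in range(0, len(listefilesmp3)):
--         for file in listefilesmp3 :
--             numbersound = ""
--             for lettre in file:
--                 if str(lettre) in "0123456789" :
--                     numbersound += str(lettre)
--             if str(numbersound) == str(i) :
--                 newlistesorted.append(file)
--     return newlistesorted
-- ===== SOURCE B (Python) =====
-- def TriageEZ(listefilesmp3):
--     buckets = {}
--     for file in listefilesmp3: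
--         num = "".join(c for c in file if c in "0123456789")
--         buckets.setdefault(num, []).append(file)
--     out = []
--     for i in range(len(listefilesmp3)):
--         out.extend(buckets.get(str(i), []))
--     return out
-- ===== Notes on version B (the rewrite author's own statement) =====
-- stated objective: faster
-- what changed: B extracts each file's digit string once and groups the files into a dict of buckets keyed by that string, then emits the bucket looked up under str(i) for i in range(n), instead of A's rescan of the whole list (re-extracting every digit string) for each index i.
import Mathlib
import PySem

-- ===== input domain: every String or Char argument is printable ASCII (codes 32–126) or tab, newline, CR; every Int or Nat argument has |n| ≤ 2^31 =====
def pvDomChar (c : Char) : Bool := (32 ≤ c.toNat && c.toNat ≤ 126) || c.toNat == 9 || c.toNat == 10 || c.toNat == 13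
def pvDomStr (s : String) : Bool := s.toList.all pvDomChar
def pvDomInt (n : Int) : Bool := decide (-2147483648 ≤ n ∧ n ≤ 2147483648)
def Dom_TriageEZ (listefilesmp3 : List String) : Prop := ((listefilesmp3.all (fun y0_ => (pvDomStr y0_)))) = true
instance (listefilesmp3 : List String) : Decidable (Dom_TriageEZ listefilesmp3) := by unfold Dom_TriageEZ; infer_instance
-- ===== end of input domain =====

-- B buckets the files by their extracted digit string in ONE pass over the list and then emits the
-- buckets for i = 0 … n-1, instead of A's rescan of the whole list (re-extracting every digit string)
-- for every index i; objective: faster.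

-- ===== PORT A =====
def TriageEZ (listefilesmp3 : List String) : List String :=
  (PySem.List.pyRange 0 (PySem.List.len listefilesmp3) 1).foldl (fun newlistesorted i =>
    listefilesmp3.foldl (fun acc file =>
      -- 'str(lettre) in "0123456789"': a 1-character substring test is exactly membership
      let numbersound : List Char :=
        file.toList.foldl (fun nb lettre =>
          if lettre ∈ "0123456789".toList then nb ++ [lettre] else nb) []
      if numbersound = PySem.Int.toChars i then acc ++ [file] else acc)
      newlistesorted) []

-- ===== PORT B =====
def TriageEZ_alt (listefilesmp3 : List String) : List String :=
  -- buckets.setdefault(num, []).append(file)  ==  buckets[num] = buckets.get(num, []) + [file]  ==  Dict.modify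
  let buckets : PySem.Dict (List Char) (List String) :=
    listefilesmp3.foldl (fun d file =>
      PySem.Dict.modify d (file.toList.filter (fun c => c ∈ "0123456789".toList)) []
        (fun fs => fs ++ [file])) PySem.Dict.empty
  (PySem.List.pyRange 0 (PySem.List.len listefilesmp3) 1).foldl (fun out i =>
    out ++ PySem.Dict.getD buckets (PySem.Int.toChars i) []) []

-- ===== PRECONDITION & SPEC =====
def Spec_TriageEZ (listefilesmp3 : List String) (out : List String) : Prop := out = TriageEZ_alt listefilesmp3
instance (listefilesmp3 : List String) (out : List String) : Decidable (Spec_TriageEZ listefilesmp3 out) := by unfold Spec_TriageEZ; infer_instance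

-- ===== CLAIM (what is proved, stated in full; the proofs are below) =====
def Claim_equal_TriageEZ : Prop := ∀ (listefilesmp3 : List String), Dom_TriageEZ listefilesmp3 → Spec_TriageEZ listefilesmp3 (TriageEZ listefilesmp3)

-- ===== LEMMAS AND PROOFS =====

-- ===== VERDICT (by name: the statement is the Claim_ definition above) =====
theorem TriageEZ_spec : Claim_equal_TriageEZ := by
  intro l _
  unfold Spec_TriageEZ TriageEZ TriageEZ_alt
  simp only [PySem.List.foldl_append_ite_eq_filter, List.nil_append,
    PySem.List.foldl_append_eq_flatMap]
  rw [← List.foldl_map (f := fun (file : String) => (file.toList.filter (fun c => c ∈ "0123456789".toList), file))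
      (g := fun (d : PySem.Dict (List Char) (List String)) p => PySem.Dict.modify d p.1 [] (fun fs => fs ++ [p.2]))]
  apply List.flatMap_congr
  intro i hi
  rw [PySem.Dict.getD_foldl_modify_append, PySem.Dict.getD_empty, List.nil_append,
    List.filter_map, List.map_map]
  simp only [Function.comp_def]
  rw [List.map_id']
  apply List.filter_congr
  intro x _
  rw [Bool.eq_iff_iff]
  simp
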